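-- pv_equiv track=rewrite | github.com/OZestina/TheGreatestGrace | codingTest/programmers/py/230113_택배배달.py | solution
-- ===== SOURCE A (Python) =====
-- def solution(cap, n, deliveries, pickups):
--     answer = 0
--     d = 0
--     p = 0
--     for i in range(n - 1, -1, -1):
--         if deliveries[i] or pickups[i]:
--             pos = i
--             break
--
--     for i in range(n - 1, -1, -1):
--         d += deliveries[i]
--         p += pickups[i]
--
--         while d > cap or p > cap:
--             d -= cap
--             p -= cap
--             answer += 2 * (pos + 1)
--             pos = i
--
--     if d > 0 or p > 0:
--         answer += 2 * (pos + 1)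
--
--     return answer
-- ===== SOURCE B (Python) =====
-- def solution(cap, n, deliveries, pickups):
--     # One pass from the far end; the trip count per position is computed with
--     # ceiling division instead of A's repeated while-loop subtraction.
--     answer = 0
--     d = 0
--     p = 0
--     pos = -1  # last position with any work; -1 while none seen yet
--     for i in range(n - 1, -1, -1):
--         if pos < 0 and (deliveries[i] != 0 or pickups[i] != 0):
--             pos = i
--         d += deliveries[i]
--         p += pickups[i]
--         k = max(0, -((cap - d) // cap), -((cap - p) // cap))
--         if k:
--             answer += 2 * (pos + 1) + (k - 1) * 2 * (i + 1)
--             d -= k * cap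
--             p -= k * cap
--             pos = i
--     if d > 0 or p > 0:
--         answer += 2 * (pos + 1)
--     return answer
-- ===== Notes on version B (the rewrite author's own statement) =====
-- stated objective: alternative
-- what changed: The inner trip-by-trip while loop (subtract cap once per round trip) is replaced by a closed-form ceiling-division trip count per position, and the separate initial scan for the last busy position is folded into the same single backward pass.
-- outside the precondition, e.g. on solution(0, 1, [0], [0]): A returns 0, B raises ZeroDivisionError
import Mathlib
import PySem

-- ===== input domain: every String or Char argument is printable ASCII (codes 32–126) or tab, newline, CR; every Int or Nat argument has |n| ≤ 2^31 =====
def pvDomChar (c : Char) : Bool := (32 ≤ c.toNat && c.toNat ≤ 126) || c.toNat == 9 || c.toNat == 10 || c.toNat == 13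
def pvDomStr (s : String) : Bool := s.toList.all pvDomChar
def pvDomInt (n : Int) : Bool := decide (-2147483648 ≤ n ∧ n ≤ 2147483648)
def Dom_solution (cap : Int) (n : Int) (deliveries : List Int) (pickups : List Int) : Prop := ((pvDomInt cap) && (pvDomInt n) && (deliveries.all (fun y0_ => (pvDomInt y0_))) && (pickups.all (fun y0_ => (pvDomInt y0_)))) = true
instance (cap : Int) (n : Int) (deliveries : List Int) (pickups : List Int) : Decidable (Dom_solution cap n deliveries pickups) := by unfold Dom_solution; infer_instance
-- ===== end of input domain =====

-- B replaces A's trip-by-trip inner while loop by a closed-form ceiling-division trip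
-- count and folds A's separate initial position scan into the same single backward pass
-- (objective: alternative).


-- ===== PORT A =====
-- xs[i]; Pre_solution guarantees every index used is in range, so the default is exact there
def pvAGet (xs : List Int) (i : Int) : Int := (PySem.List.pyGet? xs i).getD 0

-- first for-loop: scan i = n-1 … 0, set pos at the first busy index and break;
-- on [] (no busy index) Python leaves 'pos' unassigned, and under Pre_ it is then never
-- read, so the returned default 0 is unobservable
def pvAFindPos (ds ps : List Int) : List Int → Int
  | [] => 0
  | i :: r => if pvAGet ds i ≠ 0 ∨ pvAGet ps i ≠ 0 then i else pvAFindPos ds ps r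

-- the inner 'while d > cap or p > cap' loop; fuel only makes the recursion total: under
-- Pre_ (1 ≤ cap) the fuel passed below strictly exceeds the number of iterations
def pvAWhile (cap : Int) : Nat → Int → Int → Int → Int → Int → Int × Int × Int × Int
  | 0, d, p, ans, pos, _ => (d, p, ans, pos)
  | fuel+1, d, p, ans, pos, i =>
    if d > cap ∨ p > cap then
      pvAWhile cap fuel (d - cap) (p - cap) (ans + 2 * (pos + 1)) i i
    else (d, p, ans, pos)

-- second for-loop, state (d, p, answer, pos)
def pvALoop (cap : Int) (ds ps : List Int) : List Int → Int → Int → Int → Int → Int × Int × Int × Int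
  | [], d, p, ans, pos => (d, p, ans, pos)
  | i :: r, d, p, ans, pos =>
    let d' := d + pvAGet ds i
    let p' := p + pvAGet ps i
    let s := pvAWhile cap ((d' - cap).toNat + (p' - cap).toNat + 1) d' p' ans pos i
    pvALoop cap ds ps r s.1 s.2.1 s.2.2.1 s.2.2.2

def solution (cap : Int) (n : Int) (deliveries : List Int) (pickups : List Int) : Int :=
  let pos0 := pvAFindPos deliveries pickups (PySem.List.pyRange (n - 1) (-1) (-1))
  let s := pvALoop cap deliveries pickups (PySem.List.pyRange (n - 1) (-1) (-1)) 0 0 0 pos0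
  if s.1 > 0 ∨ s.2.1 > 0 then s.2.2.1 + 2 * (s.2.2.2 + 1) else s.2.2.1

-- ===== PORT B =====
def pvBGet (xs : List Int) (i : Int) : Int := (PySem.List.pyGet? xs i).getD 0

-- k = max(0, -((cap - d) // cap), -((cap - p) // cap))
def pvBTrips (cap d p : Int) : Int :=
  max (max 0 (-(PySem.Int.floordiv (cap - d) cap))) (-(PySem.Int.floordiv (cap - p) cap))

-- B's single backward pass, state (answer, d, p, pos)
def pvBLoop (cap : Int) (ds ps : List Int) : List Int → Int → Int → Int → Int → Int × Int × Int × Int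
  | [], ans, d, p, pos => (ans, d, p, pos)
  | i :: r, ans, d, p, pos =>
    let pos1 := if pos < 0 ∧ (pvBGet ds i ≠ 0 ∨ pvBGet ps i ≠ 0) then i else pos
    let d' := d + pvBGet ds i
    let p' := p + pvBGet ps i
    let k := pvBTrips cap d' p'
    if k ≠ 0 then
      pvBLoop cap ds ps r (ans + 2 * (pos1 + 1) + (k - 1) * 2 * (i + 1)) (d' - k * cap) (p' - k * cap) i
    else
      pvBLoop cap ds ps r ans d' p' pos1

def solution_alt (cap : Int) (n : Int) (deliveries : List Int) (pickups : List Int) : Int :=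
  let s := pvBLoop cap deliveries pickups (PySem.List.pyRange (n - 1) (-1) (-1)) 0 0 0 (-1)
  if s.2.1 > 0 ∨ s.2.2.1 > 0 then s.1 + 2 * (s.2.2.2 + 1) else s.1

-- ===== PRECONDITION & SPEC =====
-- Pre_ excludes cap ≤ 0, where A's while loop never terminates once it fires (and B's
-- floor division raises ZeroDivisionError at cap = 0; on the rare cap ≤ 0 inputs where
-- the loop never fires A still returns, see claim.json cites), and n larger than either
-- list, where A raises IndexError.
def Pre_solution (cap : Int) (n : Int) (deliveries : List Int) (pickups : List Int) : Prop :=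
  1 ≤ cap ∧ n ≤ (deliveries.length : Int) ∧ n ≤ (pickups.length : Int)
instance (cap : Int) (n : Int) (deliveries : List Int) (pickups : List Int) : Decidable (Pre_solution cap n deliveries pickups) := by unfold Pre_solution; infer_instance

def pvWitness_solution : Int × Int × List Int × List Int := (4, 3, [1, 0, 2], [0, 2, 0])

def Spec_solution (cap : Int) (n : Int) (deliveries : List Int) (pickups : List Int) (out : Int) : Prop := out = solution_alt cap n deliveries pickups
instance (cap : Int) (n : Int) (deliveries : List Int) (pickups : List Int) (out : Int) : Decidable (Spec_solution cap n deliveries pickups out) := by unfold Spec_solution; infer_instance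

-- ===== CLAIM (what is proved, stated in full; the proofs are below) =====
def Claim_equal_solution : Prop := ∀ (cap : Int) (n : Int) (deliveries : List Int) (pickups : List Int), Dom_solution cap n deliveries pickups → Pre_solution cap n deliveries pickups → Spec_solution cap n deliveries pickups (solution cap n deliveries pickups)

-- ===== LEMMAS AND PROOFS =====

theorem pvBGet_eq_pvAGet (xs : List Int) (i : Int) : pvBGet xs i = pvAGet xs i := rfl

-- basic floordiv brackets for 1 ≤ cap
theorem pvTrips_zero_of_le {cap d p : Int} (hcap : 1 ≤ cap) (hd : d ≤ cap) (hp : p ≤ cap) :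
    pvBTrips cap d p = 0 := by
  have h1 : (0:Int) ≤ PySem.Int.floordiv (cap - d) cap := by
    rw [PySem.Int.le_floordiv_iff_mul_le (show (0:Int) < cap by omega)]; omega
  have h2 : (0:Int) ≤ PySem.Int.floordiv (cap - p) cap := by
    rw [PySem.Int.le_floordiv_iff_mul_le (show (0:Int) < cap by omega)]; omega
  unfold pvBTrips; omega

theorem pvTrips_pos_of_gt {cap d p : Int} (hcap : 1 ≤ cap) (h : d > cap ∨ p > cap) :
    1 ≤ pvBTrips cap d p := by
  unfold pvBTrips
  rcases h with h | h
  · have : PySem.Int.floordiv (cap - d) cap < 0 := by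
      rw [PySem.Int.floordiv_lt_iff_lt_mul (show (0:Int) < cap by omega)]; omega
    omega
  · have : PySem.Int.floordiv (cap - p) cap < 0 := by
      rw [PySem.Int.floordiv_lt_iff_lt_mul (show (0:Int) < cap by omega)]; omega
    omega

theorem pvFloordiv_shift {cap x : Int} (hcap : 1 ≤ cap) :
    PySem.Int.floordiv (cap - (x - cap)) cap = PySem.Int.floordiv (cap - x) cap + 1 := by
  have h0 : (0:Int) < cap := by omega
  have hq := (PySem.Int.floordiv_eq_iff_of_pos h0).mp
    (rfl : PySem.Int.floordiv (cap - x) cap = PySem.Int.floordiv (cap - x) cap)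
  rw [PySem.Int.floordiv_eq_iff_of_pos h0]
  constructor <;> nlinarith [hq.1, hq.2]

theorem pvTrips_step {cap d p : Int} (hcap : 1 ≤ cap) (h : d > cap ∨ p > cap) :
    pvBTrips cap (d - cap) (p - cap) = pvBTrips cap d p - 1 := by
  have hk := pvTrips_pos_of_gt hcap h
  unfold pvBTrips at *
  rw [pvFloordiv_shift hcap, pvFloordiv_shift hcap]
  omega

-- the while loop computes the closed form
theorem pvAWhile_eq (cap : Int) (hcap : 1 ≤ cap) :
    ∀ (fuel : Nat) (d p ans pos i : Int), (d - cap).toNat + (p - cap).toNat < fuel →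
    pvAWhile cap fuel d p ans pos i =
      (d - pvBTrips cap d p * cap, p - pvBTrips cap d p * cap,
       (if pvBTrips cap d p = 0 then ans else ans + 2 * (pos + 1) + (pvBTrips cap d p - 1) * 2 * (i + 1)),
       (if pvBTrips cap d p = 0 then pos else i)) := by
  intro fuel
  induction fuel with
  | zero => intro d p ans pos i hf; omega
  | succ m ih =>
    intro d p ans pos i hf
    by_cases h : d > cap ∨ p > cap
    · have hk := pvTrips_pos_of_gt hcap h
      have hstep := pvTrips_step hcap h
      simp only [pvAWhile, if_pos h]
      rw [ih (d - cap) (p - cap) (ans + 2 * (pos + 1)) i i (by omega), hstep]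
      have hne0 : pvBTrips cap d p ≠ 0 := by omega
      by_cases hk1 : pvBTrips cap d p - 1 = 0
      · simp only [if_pos hk1, if_neg hne0, Prod.mk.injEq]
        exact ⟨by ring, by ring, by rw [hk1]; ring, by trivial⟩
      · simp only [if_neg hk1, if_neg hne0, Prod.mk.injEq]
        exact ⟨by ring, by ring, by ring, by trivial⟩
    · have hd : d ≤ cap := by omega
      have hp : p ≤ cap := by omega
      have hk : pvBTrips cap d p = 0 := pvTrips_zero_of_le hcap hd hp
      simp [pvAWhile, if_neg h, hk]

-- the two passes agree: either the positions are equal (and B's is ≥ 0), or B has not yet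
-- seen a busy index, everything so far was zero, and A's pos is the scan of the rest
theorem pvLoop_eq (cap : Int) (ds ps : List Int) (hcap : 1 ≤ cap) :
    ∀ (r : List Int) (d p ans posA posB : Int),
    ((0 ≤ posB ∧ posA = posB) ∨ (posB = -1 ∧ d = 0 ∧ p = 0 ∧ posA = pvAFindPos ds ps r)) →
    (∀ i ∈ r, 0 ≤ i) →
    (pvALoop cap ds ps r d p ans posA).1 = (pvBLoop cap ds ps r ans d p posB).2.1 ∧
    (pvALoop cap ds ps r d p ans posA).2.1 = (pvBLoop cap ds ps r ans d p posB).2.2.1 ∧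
    (pvALoop cap ds ps r d p ans posA).2.2.1 = (pvBLoop cap ds ps r ans d p posB).1 ∧
    ((pvALoop cap ds ps r d p ans posA).2.2.2 = (pvBLoop cap ds ps r ans d p posB).2.2.2 ∨
      ((pvALoop cap ds ps r d p ans posA).1 = 0 ∧ (pvALoop cap ds ps r d p ans posA).2.1 = 0)) := by
  intro r
  induction r with
  | nil =>
    intro d p ans posA posB hinv _
    rcases hinv with ⟨_, h⟩ | ⟨_, hd, hp, _⟩
    · simp [pvALoop, pvBLoop, h]
    · simp [pvALoop, pvBLoop, hd, hp]
  | cons i r ih =>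
    intro d p ans posA posB hinv hmem
    have hi : 0 ≤ i := hmem i (by simp)
    have hmem' : ∀ j ∈ r, 0 ≤ j := fun j hj => hmem j (by simp [hj])
    simp only [pvALoop, pvBLoop, pvBGet_eq_pvAGet]
    set d' := d + pvAGet ds i with hd'
    set p' := p + pvAGet ps i with hp'
    rw [pvAWhile_eq cap hcap _ d' p' ans posA i (by omega)]
    set k := pvBTrips cap d' p' with hkdef
    rcases hinv with ⟨hpb, hpa⟩ | ⟨hpb, hd0, hp0, hpa⟩
    · -- positions already agree; B does not reset pos (posB ≥ 0)
      have hc : ¬ (posB < 0 ∧ (pvAGet ds i ≠ 0 ∨ pvAGet ps i ≠ 0)) := by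
        intro hh; omega
      simp only [if_neg hc]
      by_cases hk : k = 0
      · simp only [if_pos hk, if_neg (by simp [hk] : ¬ k ≠ 0)]
        have e1 : d' - k * cap = d' := by rw [hk]; ring
        have e2 : p' - k * cap = p' := by rw [hk]; ring
        rw [e1, e2]
        exact ih d' p' ans posA posB (Or.inl ⟨hpb, hpa⟩) hmem'
      · simp only [if_neg hk, if_pos hk]
        rw [hpa]
        exact ih (d' - k * cap) (p' - k * cap) (ans + 2 * (posB + 1) + (k - 1) * 2 * (i + 1)) i i
          (Or.inl ⟨hi, rfl⟩) hmem'
    · -- B has pos = -1; all entries so far were zero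
      by_cases hz : pvAGet ds i ≠ 0 ∨ pvAGet ps i ≠ 0
      · -- first busy index: both positions become i
        have hfind : pvAFindPos ds ps (i :: r) = i := by
          simp [pvAFindPos, hz]
        have hpa' : posA = i := by rw [hpa, hfind]
        have hc : (posB < 0 ∧ (pvAGet ds i ≠ 0 ∨ pvAGet ps i ≠ 0)) := ⟨by omega, hz⟩
        simp only [if_pos hc]
        by_cases hk : k = 0
        · simp only [if_pos hk, if_neg (by simp [hk] : ¬ k ≠ 0)]
          have e1 : d' - k * cap = d' := by rw [hk]; ring
          have e2 : p' - k * cap = p' := by rw [hk]; ring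
          rw [e1, e2]
          exact ih d' p' ans posA i (Or.inl ⟨hi, hpa'⟩) hmem'
        · simp only [if_neg hk, if_pos hk]
          rw [hpa']
          exact ih (d' - k * cap) (p' - k * cap) (ans + 2 * (i + 1) + (k - 1) * 2 * (i + 1)) i i
            (Or.inl ⟨hi, rfl⟩) hmem'
      · -- still all-zero: d' = p' = 0, no trips, B keeps pos = -1
        simp only [not_or, ne_eq, not_not] at hz
        have hdz : pvAGet ds i = 0 := hz.1
        have hpz : pvAGet ps i = 0 := hz.2
        have hd'0 : d' = 0 := by rw [hd', hd0, hdz]; norm_num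
        have hp'0 : p' = 0 := by rw [hp', hp0, hpz]; norm_num
        have hk : k = 0 := by
          rw [hkdef, hd'0, hp'0]
          exact pvTrips_zero_of_le hcap (by omega) (by omega)
        have hc : ¬ (posB < 0 ∧ (pvAGet ds i ≠ 0 ∨ pvAGet ps i ≠ 0)) := by
          intro hh; rcases hh.2 with h | h; exact h hdz; exact h hpz
        have hfind : pvAFindPos ds ps (i :: r) = pvAFindPos ds ps r := by
          simp [pvAFindPos, hdz, hpz]
        simp only [if_neg hc, if_pos hk, if_neg (by simp [hk] : ¬ k ≠ 0)]
        have e1 : d' - k * cap = d' := by rw [hk]; ring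
        have e2 : p' - k * cap = p' := by rw [hk]; ring
        rw [e1, e2]
        exact ih d' p' ans posA posB (Or.inr ⟨hpb, hd'0, hp'0, by rw [hpa, hfind]⟩) hmem'

-- ===== VERDICT (by name: the statement is the Claim_ definition above) =====
theorem solution_spec : Claim_equal_solution := by
  intro cap n deliveries pickups _ hpre
  have hcap : 1 ≤ cap := hpre.1
  have hmem : ∀ i ∈ PySem.List.pyRange (n - 1) (-1) (-1), 0 ≤ i := by
    intro i hi
    have := (PySem.List.mem_pyRange_neg_one.mp hi).1
    omega
  obtain ⟨hd, hp, ha, hpos⟩ := pvLoop_eq cap deliveries pickups hcap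
    (PySem.List.pyRange (n - 1) (-1) (-1)) 0 0 0
    (pvAFindPos deliveries pickups (PySem.List.pyRange (n - 1) (-1) (-1))) (-1)
    (Or.inr ⟨rfl, rfl, rfl, rfl⟩) hmem
  unfold Spec_solution solution solution_alt
  simp only [gt_iff_lt]
  rcases hpos with hpos | ⟨hz1, hz2⟩
  · rw [hd, hp, ha, hpos]
  · have hb1 : (pvBLoop cap deliveries pickups (PySem.List.pyRange (n - 1) (-1) (-1)) 0 0 0 (-1)).2.1 = 0 := by
      rw [← hd]; exact hz1
    have hb2 : (pvBLoop cap deliveries pickups (PySem.List.pyRange (n - 1) (-1) (-1)) 0 0 0 (-1)).2.2.1 = 0 := by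
      rw [← hp]; exact hz2
    rw [ha, hz1, hz2, hb1, hb2]
    norm_num
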